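-- pv_equiv track=rewrite | github.com/abizerPatanwala/Structure-From-Motion | data_processing.py | append_camera_indices
-- ===== SOURCE A (Python) =====
-- def append_camera_indices(camera_indices,worldpts_global, worldpts, match, new_or_common):
--   if (match == '12'):
--     for i in range(len(worldpts_global)):
--       camera_indices.append([1, 2, -1,-1,-1])
--   else:
--     if (new_or_common == 'new'):
--       for i in range(len(worldpts)):
--         tmp = [-1,-1,-1,-1,-1]
--         tmp[int(match[0]) - 1] = int(match[0])
--         tmp[int(match[1]) - 1] = int(match[1])
--         camera_indices.append(tmp)
--     elif (new_or_common == 'common'):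
--       for i in range(len(worldpts)):
--         index = []
--         for j in range(len(worldpts_global)):
--           if ((worldpts[i][0] == worldpts_global[j][0]) and (worldpts[i][1] == worldpts_global[j][1])):
--             index.append(j)
--           for k in range(len(index)):
--             camera_indices[index[k]][int(match[1])-1] = int(match[1])
--   return camera_indices
-- ===== SOURCE B (Python) =====
-- def _new_row(match):
--     row = [-1] * 5
--     row[int(match[0]) - 1] = int(match[0])
--     row[int(match[1]) - 1] = int(match[1])
--     return row
--
--
-- def append_camera_indices(camera_indices, worldpts_global, worldpts, match, new_or_common):
--     # NOTE: mutates camera_indices in place, like the original; returns it.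
--     if match == '12':
--         camera_indices += [[1, 2, -1, -1, -1] for _ in worldpts_global]
--     elif new_or_common == 'new':
--         camera_indices += [_new_row(match) for _ in worldpts]
--     elif new_or_common == 'common':
--         coords = {(p[0], p[1]) for p in worldpts}
--         for j in range(len(worldpts_global)):
--             g = worldpts_global[j]
--             if (g[0], g[1]) in coords:
--                 v = int(match[1])
--                 camera_indices[j][v - 1] = v
--     return camera_indices
-- ===== Notes on version B (the rewrite author's own statement) =====
-- stated objective: simpler
-- what changed: The 'common' branch's triple-nested loop (for every world point, rescan all global points while repeatedly re-assigning every index collected so far) is replaced by one pass: build a set of worldpts coordinate pairs once, then a single loop over worldpts_global assigning each matching row once; the '12' and 'new' branches become list-comprehension extends.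
-- outside the precondition, e.g. on append_camera_indices([], [], [[1]], '13', 'common'): A returns [], B raises IndexError; on append_camera_indices([], [[1]], [], '13', 'common'): A returns [], B raises IndexError; on append_camera_indices([], [[2, 0]], [[1]], '13', 'common'): A returns [], B raises IndexError
import Mathlib
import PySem

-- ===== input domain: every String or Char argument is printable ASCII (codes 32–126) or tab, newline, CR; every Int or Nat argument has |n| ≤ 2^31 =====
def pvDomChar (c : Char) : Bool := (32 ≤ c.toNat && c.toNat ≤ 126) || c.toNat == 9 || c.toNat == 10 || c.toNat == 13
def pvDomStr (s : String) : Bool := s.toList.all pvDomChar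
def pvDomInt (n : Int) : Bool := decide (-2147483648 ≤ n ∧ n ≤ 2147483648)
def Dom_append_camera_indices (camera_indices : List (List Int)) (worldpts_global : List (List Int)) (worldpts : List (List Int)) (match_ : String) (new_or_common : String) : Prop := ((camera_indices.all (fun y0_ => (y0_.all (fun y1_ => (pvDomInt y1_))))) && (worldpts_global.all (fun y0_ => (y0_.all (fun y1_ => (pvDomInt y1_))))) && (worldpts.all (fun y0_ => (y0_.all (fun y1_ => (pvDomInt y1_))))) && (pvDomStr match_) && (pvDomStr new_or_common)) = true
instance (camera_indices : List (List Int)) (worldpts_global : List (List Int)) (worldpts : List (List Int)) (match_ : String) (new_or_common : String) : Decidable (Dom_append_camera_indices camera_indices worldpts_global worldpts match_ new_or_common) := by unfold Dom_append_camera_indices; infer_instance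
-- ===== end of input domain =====

-- B replaces the triple-nested 'common' matching loop by one set-membership pass over
-- worldpts_global (and the other branches by comprehension-style extends); equivalence is
-- about the RETURN value only (the Python original mutates camera_indices in place).

-- int(match_[k]) for a digit character (exact on ASCII digits; Pre_ guarantees a digit
-- wherever the Python actually evaluates int())
def pvDigit (match_ : String) (k : Nat) : Int := ((match_.toList.getD k ' ').toNat : Int) - 48

-- row[v-1] = v  (Python index assignment incl. negative wrap; identity where Python raises
-- IndexError — those inputs are outside Pre_)
def pvAsnRow (v : Int) (row : List Int) : List Int := PySem.List.pySetD row (v - 1) v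

-- ===== PORT A =====
def append_camera_indices (camera_indices : List (List Int)) (worldpts_global : List (List Int)) (worldpts : List (List Int)) (match_ : String) (new_or_common : String) : List (List Int) :=
  if match_ = "12" then
    (List.range worldpts_global.length).foldl (fun c _ => c ++ [[1, 2, -1, -1, -1]]) camera_indices
  else if new_or_common = "new" then
    (List.range worldpts.length).foldl (fun c _ =>
      let tmp : List Int := [-1, -1, -1, -1, -1]
      let tmp := pvAsnRow (pvDigit match_ 0) tmp
      let tmp := pvAsnRow (pvDigit match_ 1) tmp
      c ++ [tmp]) camera_indices
  else if new_or_common = "common" then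
    (List.range worldpts.length).foldl (fun c i =>
      ((List.range worldpts_global.length).foldl (fun (st : List Int × List (List Int)) j =>
        let index : List Int :=
          if ((worldpts.getD i []).getD 0 0 == (worldpts_global.getD j []).getD 0 0 &&
              (worldpts.getD i []).getD 1 0 == (worldpts_global.getD j []).getD 1 0) then
            st.1 ++ [(j : Int)]
          else st.1
        -- for k in range(len(index)): camera_indices[index[k]][int(match[1])-1] = int(match[1])
        (index, index.foldl (fun cc idx => cc.modify idx.toNat (pvAsnRow (pvDigit match_ 1))) st.2))
        (([] : List Int), c)).2) camera_indices
  else camera_indices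

-- ===== PORT B =====
def append_camera_indices_alt (camera_indices : List (List Int)) (worldpts_global : List (List Int)) (worldpts : List (List Int)) (match_ : String) (new_or_common : String) : List (List Int) :=
  if match_ = "12" then
    camera_indices ++ worldpts_global.map (fun _ => ([1, 2, -1, -1, -1] : List Int))
  else if new_or_common = "new" then
    camera_indices ++ worldpts.map (fun _ =>
      pvAsnRow (pvDigit match_ 1) (pvAsnRow (pvDigit match_ 0) [-1, -1, -1, -1, -1]))
  else if new_or_common = "common" then
    let coords : PySem.Set (Int × Int) :=
      PySem.Set.ofList (worldpts.map (fun p => (p.getD 0 0, p.getD 1 0)))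
    (List.range worldpts_global.length).foldl (fun c j =>
      if ((worldpts_global.getD j []).getD 0 0, (worldpts_global.getD j []).getD 1 0) ∈ coords then
        c.modify j (pvAsnRow (pvDigit match_ 1))
      else c) camera_indices
  else camera_indices

-- ===== PRECONDITION & SPEC =====
-- Pre_ excludes exactly the inputs where the Python A raises (bad digit/index in 'new',
-- a matched row whose camera_indices slot or column is out of range in 'common'), plus the
-- 'common' inputs with a coordinate row shorter than 2 on which A happens to return only by
-- short-circuiting while B's set build/lookup touches both coordinates and raises.
def Pre_append_camera_indices (camera_indices : List (List Int)) (worldpts_global : List (List Int)) (worldpts : List (List Int)) (match_ : String) (new_or_common : String) : Prop :=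
  match_ = "12" ∨
  ((new_or_common = "new" →
      (worldpts = [] ∨
        (2 ≤ match_.toList.length ∧
         (match_.toList.getD 0 ' ').isDigit = true ∧ match_.toList.getD 0 ' ' ≤ '5' ∧
         (match_.toList.getD 1 ' ').isDigit = true ∧ match_.toList.getD 1 ' ' ≤ '5'))) ∧
   (new_or_common = "common" →
      ((∀ p ∈ worldpts, 2 ≤ p.length) ∧ (∀ g ∈ worldpts_global, 2 ≤ g.length) ∧
       (∀ jg ∈ worldpts_global.zipIdx,
          (∃ p ∈ worldpts, p.getD 0 0 = jg.1.getD 0 0 ∧ p.getD 1 0 = jg.1.getD 1 0) →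
          (2 ≤ match_.toList.length ∧ (match_.toList.getD 1 ' ').isDigit = true ∧
           jg.2 < camera_indices.length ∧
           -(((camera_indices.getD jg.2 []).length : Int)) ≤ pvDigit match_ 1 - 1 ∧
           pvDigit match_ 1 - 1 < ((camera_indices.getD jg.2 []).length : Int))))))
instance (camera_indices : List (List Int)) (worldpts_global : List (List Int)) (worldpts : List (List Int)) (match_ : String) (new_or_common : String) : Decidable (Pre_append_camera_indices camera_indices worldpts_global worldpts match_ new_or_common) := by unfold Pre_append_camera_indices; infer_instance

def pvWitness_append_camera_indices : List (List Int) × List (List Int) × List (List Int) × String × String :=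
  ([[0, 0, 0]], [[1, 2]], [[1, 2]], "23", "common")

def Spec_append_camera_indices (camera_indices : List (List Int)) (worldpts_global : List (List Int)) (worldpts : List (List Int)) (match_ : String) (new_or_common : String) (out : List (List Int)) : Prop := out = append_camera_indices_alt camera_indices worldpts_global worldpts match_ new_or_common
instance (camera_indices : List (List Int)) (worldpts_global : List (List Int)) (worldpts : List (List Int)) (match_ : String) (new_or_common : String) (out : List (List Int)) : Decidable (Spec_append_camera_indices camera_indices worldpts_global worldpts match_ new_or_common out) := by unfold Spec_append_camera_indices; infer_instance

-- ===== CLAIM (what is proved, stated in full; the proofs are below) =====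
def Claim_equal_append_camera_indices : Prop := ∀ (camera_indices : List (List Int)) (worldpts_global : List (List Int)) (worldpts : List (List Int)) (match_ : String) (new_or_common : String), Dom_append_camera_indices camera_indices worldpts_global worldpts match_ new_or_common → Pre_append_camera_indices camera_indices worldpts_global worldpts match_ new_or_common → Spec_append_camera_indices camera_indices worldpts_global worldpts match_ new_or_common (append_camera_indices camera_indices worldpts_global worldpts match_ new_or_common)

-- ===== LEMMAS AND PROOFS =====

-- writing the same value into the same slot twice is writing it once
theorem pvAsnRow_idem (v : Int) (row : List Int) : pvAsnRow v (pvAsnRow v row) = pvAsnRow v row := by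
  unfold pvAsnRow PySem.List.pySetD PySem.List.pySet?
  cases h : PySem.List.pyIdx? row.length (v - 1) with
  | none => simp [h]
  | some k => simp [h, List.set_set]

theorem pvAsnRow_comp (v : Int) : pvAsnRow v ∘ pvAsnRow v = pvAsnRow v := by
  funext row; exact pvAsnRow_idem v row

-- the k-loop: applying the assignment along a list of row indices, row-wise view
theorem foldl_asn_char (v : Int) (js : List Int) (cs : List (List Int)) (r : Nat) :
    (js.foldl (fun cc idx => cc.modify idx.toNat (pvAsnRow v)) cs)[r]? =
      if (∃ idx ∈ js, idx.toNat = r) then (cs[r]?).map (pvAsnRow v) else cs[r]? := by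
  induction js generalizing cs with
  | nil => simp
  | cons a js ih =>
    simp only [List.foldl_cons, ih, List.getElem?_modify]
    by_cases ha : a.toNat = r <;> by_cases hm : ∃ idx ∈ js, idx.toNat = r <;>
      cases cs[r]? <;>
      simp [ha, hm, pvAsnRow_idem]

-- A's j-loop over worldpts_global for one fixed i: the collected index list and the row-wise
-- effect on the camera_indices state
theorem jloop_char (v : Int) (q : Nat → Bool) (n : Nat) (cs : List (List Int)) :
    ((List.range n).foldl (fun (st : List Int × List (List Int)) j =>
        let index : List Int := if q j then st.1 ++ [(j : Int)] else st.1
        (index, index.foldl (fun cc idx => cc.modify idx.toNat (pvAsnRow v)) st.2))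
      (([] : List Int), cs)).1 = List.map (fun j : Nat => (j : Int)) ((List.range n).filter q) ∧
    ∀ r : Nat, (((List.range n).foldl (fun (st : List Int × List (List Int)) j =>
        let index : List Int := if q j then st.1 ++ [(j : Int)] else st.1
        (index, index.foldl (fun cc idx => cc.modify idx.toNat (pvAsnRow v)) st.2))
      (([] : List Int), cs)).2)[r]? =
      if r < n ∧ q r = true then (cs[r]?).map (pvAsnRow v) else cs[r]? := by
  induction n with
  | zero => simp
  | succ n ih =>
    rw [List.range_succ, List.foldl_append]
    simp only [List.foldl_cons, List.foldl_nil]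
    refine ⟨?_, ?_⟩
    · rw [ih.1, List.filter_append, List.map_append]
      by_cases hq : q n
      · rw [if_pos hq]; simp [hq]
      · rw [if_neg hq]; simp [hq]
    · intro r
      rw [ih.1, foldl_asn_char]
      have hmem : (∃ idx ∈ (if q n then (List.map (fun j : Nat => (j : Int)) ((List.range n).filter q)) ++ [(n : Int)]
                    else List.map (fun j : Nat => (j : Int)) ((List.range n).filter q)), idx.toNat = r)
          ↔ (r < n + 1 ∧ q r = true) := by
        by_cases hq : q n
        · simp only [if_pos hq]
          constructor
          · rintro ⟨idx, hidx, hr⟩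
            rcases List.mem_append.mp hidx with hm1 | hm1
            · rcases List.mem_map.mp hm1 with ⟨j, hj, rfl⟩
              rcases List.mem_filter.mp hj with ⟨hjr, hqj⟩
              have hjn : j < n := List.mem_range.mp hjr
              simp only [Int.toNat_natCast] at hr; subst hr
              exact ⟨by omega, hqj⟩
            · have hidxn : idx = (n : Int) := by simpa using hm1
              subst hidxn; simp only [Int.toNat_natCast] at hr; subst hr
              exact ⟨by omega, hq⟩
          · rintro ⟨hr, hqr⟩
            by_cases hrn : r < n
            · exact ⟨(r : Int), List.mem_append.mpr (Or.inl (List.mem_map.mpr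
                ⟨r, List.mem_filter.mpr ⟨List.mem_range.mpr hrn, hqr⟩, rfl⟩)), Int.toNat_natCast r⟩
            · have hre : r = n := by omega
              subst hre
              exact ⟨(r : Int), List.mem_append.mpr (Or.inr (by simp)), Int.toNat_natCast r⟩
        · simp only [if_neg hq]
          constructor
          · rintro ⟨idx, hidx, hr⟩
            rcases List.mem_map.mp hidx with ⟨j, hj, rfl⟩
            rcases List.mem_filter.mp hj with ⟨hjr, hqj⟩
            have hjn : j < n := List.mem_range.mp hjr
            simp only [Int.toNat_natCast] at hr; subst hr
            exact ⟨by omega, hqj⟩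
          · rintro ⟨hr, hqr⟩
            have hrn : r < n := by
              by_contra hc2
              have hre : r = n := by omega
              subst hre; exact hq hqr
            exact ⟨(r : Int), List.mem_map.mpr
              ⟨r, List.mem_filter.mpr ⟨List.mem_range.mpr hrn, hqr⟩, rfl⟩, Int.toNat_natCast r⟩
      rw [if_congr hmem rfl rfl, ih.2 r]
      by_cases h1 : r < n <;> by_cases h2 : q r = true <;>
        by_cases h3 : r < n + 1 <;>
        simp [h1, h2, h3, Option.map_map, pvAsnRow_comp]
      all_goals omega

-- A's outer i-loop over worldpts, row-wise
theorem aouter_char (v : Int) (Q : Nat → Nat → Bool) (nwg : Nat) (m : Nat)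
    (cs : List (List Int)) (r : Nat) :
    (((List.range m).foldl (fun c i =>
        ((List.range nwg).foldl (fun (st : List Int × List (List Int)) j =>
          let index : List Int := if Q i j then st.1 ++ [(j : Int)] else st.1
          (index, index.foldl (fun cc idx => cc.modify idx.toNat (pvAsnRow v)) st.2))
        (([] : List Int), c)).2) cs))[r]? =
      if r < nwg ∧ (∃ i < m, Q i r = true) then (cs[r]?).map (pvAsnRow v) else cs[r]? := by
  induction m with
  | zero => simp
  | succ m ih =>
    rw [List.range_succ, List.foldl_append]
    simp only [List.foldl_cons, List.foldl_nil]
    rw [(jloop_char v (Q m) nwg _).2 r, ih]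
    have hsucc : (∃ i < m + 1, Q i r = true) ↔ ((∃ i < m, Q i r = true) ∨ Q m r = true) := by
      constructor
      · rintro ⟨i, hi, hq⟩
        rcases Nat.lt_succ_iff_lt_or_eq.mp hi with h | h
        · exact Or.inl ⟨i, h, hq⟩
        · subst h; exact Or.inr hq
      · rintro (⟨i, hi, hq⟩ | hq)
        · exact ⟨i, by omega, hq⟩
        · exact ⟨m, by omega, hq⟩
    have hsucc2 : (r < nwg ∧ ∃ i < m + 1, Q i r = true) ↔
        ((r < nwg ∧ ∃ i < m, Q i r = true) ∨ (r < nwg ∧ Q m r = true)) := by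
      constructor
      · rintro ⟨ha, i, hi, hq⟩
        rcases Nat.lt_succ_iff_lt_or_eq.mp hi with h | h
        · exact Or.inl ⟨ha, i, h, hq⟩
        · subst h; exact Or.inr ⟨ha, hq⟩
      · rintro (⟨ha, i, hi, hq⟩ | ⟨ha, hq⟩)
        · exact ⟨ha, i, by omega, hq⟩
        · exact ⟨ha, m, by omega, hq⟩
    rw [if_congr hsucc2 rfl rfl]
    by_cases h1 : r < nwg <;> by_cases h2 : ∃ i < m, Q i r = true <;> by_cases h3 : Q m r = true <;>
      simp [h1, h2, h3, Option.map_map, pvAsnRow_comp]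

-- B's single pass over worldpts_global, row-wise
theorem bloop_char (v : Int) (p : Nat → Prop) [DecidablePred p] (n : Nat)
    (cs : List (List Int)) (r : Nat) :
    ((List.range n).foldl (fun c j => if p j then c.modify j (pvAsnRow v) else c) cs)[r]? =
      if r < n ∧ p r then (cs[r]?).map (pvAsnRow v) else cs[r]? := by
  induction n with
  | zero => simp
  | succ n ih =>
    rw [List.range_succ, List.foldl_append]
    simp only [List.foldl_cons, List.foldl_nil]
    by_cases hp : p n
    · rw [if_pos hp, List.getElem?_modify, ih]
      by_cases h3 : n = r
      · subst h3
        simp [hp]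
      · by_cases h2 : p r
        · by_cases h1 : r < n
          · have hlt : r < n + 1 := by omega
            simp [h3, h1, h2, hlt]
          · have hlt : ¬ r < n + 1 := by omega
            simp [h3, h1, h2, hlt]
        · simp [h3, h2]
    · rw [if_neg hp, ih]
      by_cases h2 : p r
      · by_cases h1 : r < n
        · have hlt : r < n + 1 := by omega
          simp [h1, h2, hlt]
        · have hlt : ¬ r < n + 1 := by
            intro hlt
            have hrn : r = n := by omega
            exact hp (hrn ▸ h2)
          simp [h1, h2, hlt]
      · simp [h2]

-- A's match condition at row r  ↔  B's set membership at row r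
theorem cond_iff (wp wg : List (List Int)) (r : Nat) :
    (∃ i < wp.length,
        ((wp.getD i []).getD 0 0 == (wg.getD r []).getD 0 0 &&
         (wp.getD i []).getD 1 0 == (wg.getD r []).getD 1 0) = true)
      ↔ ((wg.getD r []).getD 0 0, (wg.getD r []).getD 1 0) ∈
          PySem.Set.ofList (wp.map (fun p => (p.getD 0 0, p.getD 1 0))) := by
  rw [PySem.Set.mem_ofList, List.mem_map]
  constructor
  · rintro ⟨i, hi, h⟩
    rw [Bool.and_eq_true, beq_iff_eq, beq_iff_eq] at h
    have hg : wp.getD i [] = wp[i] := List.getD_eq_getElem wp [] hi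
    exact ⟨wp[i], List.getElem_mem hi, by rw [← hg, h.1, h.2]⟩
  · rintro ⟨p, hp, heq⟩
    obtain ⟨i, hi, rfl⟩ := List.getElem_of_mem hp
    refine ⟨i, hi, ?_⟩
    rw [Bool.and_eq_true, beq_iff_eq, beq_iff_eq]
    have : wp.getD i [] = wp[i] := List.getD_eq_getElem wp [] hi
    rw [this]
    exact ⟨congrArg Prod.fst heq, congrArg Prod.snd heq⟩

-- ===== VERDICT (by name: the statement is the Claim_ definition above) =====
theorem append_camera_indices_spec : Claim_equal_append_camera_indices := by
  intro ci wg wp match_ noc _hdom _hpre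
  unfold Spec_append_camera_indices append_camera_indices append_camera_indices_alt
  by_cases h12 : match_ = "12"
  · rw [if_pos h12, if_pos h12, PySem.List.foldl_append_singleton_eq_map]
    simp [List.map_const']
  · rw [if_neg h12, if_neg h12]
    by_cases hnew : noc = "new"
    · rw [if_pos hnew, if_pos hnew]
      simp only []
      rw [PySem.List.foldl_append_singleton_eq_map]
      simp [List.map_const']
    · rw [if_neg hnew, if_neg hnew]
      by_cases hcom : noc = "common"
      · rw [if_pos hcom, if_pos hcom]
        simp only []
        apply List.ext_getElem?
        intro r
        rw [aouter_char (pvDigit match_ 1)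
              (fun i j => ((wp.getD i []).getD 0 0 == (wg.getD j []).getD 0 0 &&
                           (wp.getD i []).getD 1 0 == (wg.getD j []).getD 1 0))
              wg.length wp.length ci r,
            bloop_char (pvDigit match_ 1)
              (fun j => ((wg.getD j []).getD 0 0, (wg.getD j []).getD 1 0) ∈
                PySem.Set.ofList (wp.map (fun p => (p.getD 0 0, p.getD 1 0))))
              wg.length ci r]
        rw [if_congr (and_congr_right (fun _ => cond_iff wp wg r)) rfl rfl]
      · rw [if_neg hcom, if_neg hcom]
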